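-- pv_equiv track=rewrite | github.com/yomhub/CodeLab | python/array/1d.py | isPossibleMakeTarget
-- ===== SOURCE A (Python) =====
-- import heapq
--
-- def isPossibleMakeTarget(target: list) -> bool:
--     """
--     给定一个目标数组长n，判断是否能从[1]*n开始组合成目标数组
--     每次组合步骤：求和后替换某个元素
--     通过最大堆逆像推导能否合成，假设 K0-Kn-1
--     最大元素一定由之前的数组构成，即 K0=sum(K1-Kn-1)+a，所以K0>sum(K1-Kn-1)
--     那么如何把 K0-Kn-1 还原成 K1-Kn-1,a
--     a = K0-sum(K1-Kn-1)，为了更加效率使用 a = K0%sum(K1-Kn-1)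
--     最后能还原成n个1则成立
--     """
--     tag_size = len(target)
--     cnt = 0
--     max_heap = []
--     for o in target:
--         heapq.heappush(max_heap,-o)
--     c_sum=sum(target)
--
--     while(cnt<tag_size):
--         top = heapq.heappop(max_heap)
--         top = -top
--         c_sum-=top
--         if(c_sum==1 or top==1):return True
--         elif(c_sum<=0 or c_sum>=top):return False
--         elif(top%c_sum==1):cnt+=1
--         heapq.heappush(max_heap,0-top%c_sum)
--         c_sum+=top%c_sum
--
--     return True
-- ===== SOURCE B (Python) =====
-- def isPossibleMakeTarget(target: list) -> bool:
--     # Working multiset kept as a sorted ascending list; pop the max off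
--     # the end, re-insert the remainder with an ordered insert (no heapq).
--     arr = sorted(target)
--     c_sum = sum(arr)
--     cnt = 0
--     while cnt < len(arr):
--         top = arr.pop()
--         c_sum -= top
--         if c_sum == 1 or top == 1:
--             return True
--         if c_sum <= 0 or c_sum >= top:
--             return False
--         r = top % c_sum
--         if r == 1:
--             cnt += 1
--         i = 0
--         while i < len(arr) and arr[i] < r:
--             i += 1
--         arr.insert(i, r)
--         c_sum += r
--     return True
-- ===== Notes on version B (the rewrite author's own statement) =====
-- stated objective: simpler
-- what changed: Replaces A's negated heapq min-heap with a plain sorted ascending list: sort once, pop the current maximum off the end, and re-insert each remainder with an ordered insert, dropping heapq and the sign-flipping trick.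
import Mathlib
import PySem

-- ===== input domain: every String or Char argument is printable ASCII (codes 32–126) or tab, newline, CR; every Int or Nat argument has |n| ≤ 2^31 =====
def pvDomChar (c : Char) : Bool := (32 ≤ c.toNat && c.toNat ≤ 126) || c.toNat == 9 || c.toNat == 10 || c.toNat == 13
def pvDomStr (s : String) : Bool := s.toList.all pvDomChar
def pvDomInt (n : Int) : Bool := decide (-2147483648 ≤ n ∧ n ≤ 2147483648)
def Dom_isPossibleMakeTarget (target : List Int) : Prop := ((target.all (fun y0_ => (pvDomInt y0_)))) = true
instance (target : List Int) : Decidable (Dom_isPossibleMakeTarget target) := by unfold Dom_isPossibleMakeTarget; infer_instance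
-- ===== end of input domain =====

-- B replaces A's negated heapq min-heap by a sorted ascending list (pop the max
-- from the end, ordered re-insert of the remainder); objective: simpler, no heapq.

-- ===== PORT A =====
-- the 'for o in target: heappush(max_heap, -o)' build loop
def aBuildHeap (target : List Int) : List Int :=
  target.foldl (fun h o => h ++ [-o]) []

-- heapq's internal array layout is unobservable here: the heap is read only via
-- heappop, which removes and returns the minimum (Python min = first extremal,
-- PySem.List.min?); the guard uses heap.length, which is invariant and equal to
-- A's fixed tag_size at every loop entry (each iteration pops one and pushes one),
-- so the empty-pop branch is unreachable exactly as in A.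
def aLoop (heap : List Int) (csum : Int) (cnt : Nat) : Bool :=
  if cnt < heap.length then
    match PySem.List.min? heap (fun x => x) with
    | none => true  -- unreachable: cnt < heap.length forces heap ≠ []
    | some m =>
      let top := -m
      let cs := csum - top
      if cs = 1 ∨ top = 1 then true
      else if cs ≤ 0 ∨ top ≤ cs then false
      else
        aLoop (heap.erase m ++ [0 - PySem.Int.mod top cs])
          (cs + PySem.Int.mod top cs)
          (if PySem.Int.mod top cs = 1 then cnt + 1 else cnt)
  else true
  termination_by csum.toNat
  decreasing_by
    rename_i h3
    have h0 : 0 < csum - (-m) := by omega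
    have hr1 : PySem.Int.mod (-m) (csum - (-m)) < csum - (-m) := PySem.Int.mod_lt _ h0
    omega

def isPossibleMakeTarget (target : List Int) : Bool :=
  aLoop (aBuildHeap target) target.sum 0

-- ===== PORT B =====
-- the 'i = 0; while i < len(arr) and arr[i] < r: i += 1; arr.insert(i, r)' scan
def insertSorted (r : Int) : List Int → List Int
  | [] => [r]
  | x :: xs => if x < r then x :: insertSorted r xs else r :: x :: xs

-- arr stays sorted ascending; arr.pop() takes the last element; the guard uses
-- arr.length, which at loop entry always equals the initial length.
def bLoop (arr : List Int) (csum : Int) (cnt : Nat) : Bool :=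
  if cnt < arr.length then
    match arr.getLast? with
    | none => true  -- unreachable: cnt < arr.length forces arr ≠ []
    | some top =>
      let cs := csum - top
      if cs = 1 ∨ top = 1 then true
      else if cs ≤ 0 ∨ top ≤ cs then false
      else
        bLoop (insertSorted (PySem.Int.mod top cs) arr.dropLast)
          (cs + PySem.Int.mod top cs)
          (if PySem.Int.mod top cs = 1 then cnt + 1 else cnt)
  else true
  termination_by csum.toNat
  decreasing_by
    rename_i h3
    have h0 : 0 < csum - top := by omega
    have hr1 : PySem.Int.mod top (csum - top) < csum - top := PySem.Int.mod_lt _ h0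
    omega

def isPossibleMakeTarget_alt (target : List Int) : Bool :=
  bLoop (PySem.List.sorted target (fun x => x) false)
    (PySem.List.sorted target (fun x => x) false).sum 0

-- ===== PRECONDITION & SPEC =====
def Spec_isPossibleMakeTarget (target : List Int) (out : Bool) : Prop := out = isPossibleMakeTarget_alt target
instance (target : List Int) (out : Bool) : Decidable (Spec_isPossibleMakeTarget target out) := by unfold Spec_isPossibleMakeTarget; infer_instance

-- ===== CLAIM (what is proved, stated in full; the proofs are below) =====
def Claim_equal_isPossibleMakeTarget : Prop := ∀ (target : List Int), Dom_isPossibleMakeTarget target → Spec_isPossibleMakeTarget target (isPossibleMakeTarget target)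

-- ===== LEMMAS AND PROOFS =====

theorem insertSorted_perm (r : Int) (l : List Int) : (insertSorted r l).Perm (r :: l) := by
  induction l with
  | nil => simp [insertSorted]
  | cons x xs ih =>
    simp only [insertSorted]
    split
    · exact ((ih.cons x).trans (List.Perm.swap r x xs))
    · exact List.Perm.refl _

theorem insertSorted_pairwise (r : Int) (l : List Int) (h : l.Pairwise (· ≤ ·)) :
    (insertSorted r l).Pairwise (· ≤ ·) := by
  induction l with
  | nil => simp [insertSorted]
  | cons x xs ih =>
    rcases List.pairwise_cons.mp h with ⟨hx, hxs⟩
    simp only [insertSorted]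
    split
    · rename_i hlt
      refine List.pairwise_cons.mpr ⟨?_, ih hxs⟩
      intro y hy
      rcases List.mem_cons.mp ((insertSorted_perm r xs).mem_iff.mp hy) with h' | h'
      · omega
      · exact hx y h'
    · rename_i hge
      refine List.pairwise_cons.mpr ⟨?_, h⟩
      intro y hy
      rcases List.mem_cons.mp hy with h' | h'
      · omega
      · exact le_trans (by omega) (hx y h')

theorem getLast_ge (l : List Int) (hl : l ≠ []) (h : l.Pairwise (· ≤ ·)) :
    ∀ y ∈ l, y ≤ l.getLast hl := by
  induction l with
  | nil => simp at hl
  | cons x xs ih =>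
    rcases List.pairwise_cons.mp h with ⟨hx, hxs⟩
    intro y hy
    cases xs with
    | nil =>
      have hyx : y = x := by simpa using hy
      simp [hyx, List.getLast]
    | cons z zs =>
      rw [List.getLast_cons (by simp)]
      rcases List.mem_cons.mp hy with hy | hy
      · subst hy
        exact le_trans (hx z (by simp)) (ih (by simp) hxs z (by simp))
      · exact ih (by simp) hxs y hy

theorem erase_append_singleton_perm (l : List Int) (a : Int) :
    ((l ++ [a]).erase a).Perm l := by
  have h1 : (l ++ [a]).Perm (a :: l) := List.perm_append_singleton a l
  have h2 := h1.erase a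
  simpa [List.erase_cons_head] using h2

theorem loops_agree (k : Nat) (heap arr : List Int) (csum : Int) (cnt : Nat)
    (hk : csum.toNat ≤ k)
    (hperm : heap.Perm (arr.map (fun x => -x)))
    (hsort : arr.Pairwise (· ≤ ·)) :
    aLoop heap csum cnt = bLoop arr csum cnt := by
  induction k generalizing heap arr csum cnt with
  | zero =>
    -- csum.toNat = 0 : if the guards pass, the loops still agree because every
    -- branch that recurses requires csum = cs + top > 0; handled like succ below
    rw [aLoop, bLoop]
    have hlen : heap.length = arr.length := by
      simpa using hperm.length_eq
    rw [hlen]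
    by_cases hcnt : cnt < arr.length
    · simp only [if_pos hcnt]
      have harr : arr ≠ [] := by intro h; subst h; simp at hcnt
      have hheap : heap ≠ [] := by
        intro h; subst h; simp at hlen; omega
      obtain ⟨m, hm⟩ : ∃ m, PySem.List.min? heap (fun x => x) = some m := by
        cases heap with
        | nil => exact absurd rfl hheap
        | cons x t => exact ⟨List.foldl min x t, PySem.List.min?_id_cons x t⟩
      have htl : arr.getLast? = some (arr.getLast harr) := List.getLast?_eq_some_getLast harr
      set top := arr.getLast harr with htop
      have hmtop : m = -top := by
        have hmem := PySem.List.min?_mem hm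
        have hmin := PySem.List.min?_isMin hm
        have h1 : -top ∈ heap := by
          rw [hperm.mem_iff]
          exact List.mem_map_of_mem (List.getLast_mem harr)
        have h2 : m ≤ -top := hmin _ h1
        have h3 : -top ≤ m := by
          have : m ∈ arr.map (fun x => -x) := hperm.mem_iff.mp hmem
          obtain ⟨x, hx, hxm⟩ := List.mem_map.mp this
          have := getLast_ge arr harr hsort x hx
          omega
        omega
      rw [hm, htl]
      simp only [hmtop, neg_neg]
      by_cases hb1 : csum - top = 1 ∨ top = 1
      · rw [if_pos hb1, if_pos hb1]
      · rw [if_neg hb1, if_neg hb1]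
        by_cases hb2 : csum - top ≤ 0 ∨ top ≤ csum - top
        · rw [if_pos hb2, if_pos hb2]
        · -- recursion branch: csum > 0 so csum.toNat > 0, contradicting hk ≤ 0
          exfalso
          omega
    · simp [hcnt]
  | succ k ih =>
    rw [aLoop, bLoop]
    have hlen : heap.length = arr.length := by
      simpa using hperm.length_eq
    rw [hlen]
    by_cases hcnt : cnt < arr.length
    · simp only [if_pos hcnt]
      have harr : arr ≠ [] := by intro h; subst h; simp at hcnt
      have hheap : heap ≠ [] := by
        intro h; subst h; simp at hlen; omega
      obtain ⟨m, hm⟩ : ∃ m, PySem.List.min? heap (fun x => x) = some m := by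
        cases heap with
        | nil => exact absurd rfl hheap
        | cons x t => exact ⟨List.foldl min x t, PySem.List.min?_id_cons x t⟩
      have htl : arr.getLast? = some (arr.getLast harr) := List.getLast?_eq_some_getLast harr
      set top := arr.getLast harr with htop
      have hmtop : m = -top := by
        have hmem := PySem.List.min?_mem hm
        have hmin := PySem.List.min?_isMin hm
        have h1 : -top ∈ heap := by
          rw [hperm.mem_iff]
          exact List.mem_map_of_mem (List.getLast_mem harr)
        have h2 : m ≤ -top := hmin _ h1
        have h3 : -top ≤ m := by
          have : m ∈ arr.map (fun x => -x) := hperm.mem_iff.mp hmem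
          obtain ⟨x, hx, hxm⟩ := List.mem_map.mp this
          have := getLast_ge arr harr hsort x hx
          omega
        omega
      rw [hm, htl]
      simp only [hmtop, neg_neg]
      by_cases hb1 : csum - top = 1 ∨ top = 1
      · rw [if_pos hb1, if_pos hb1]
      · rw [if_neg hb1, if_neg hb1]
        by_cases hb2 : csum - top ≤ 0 ∨ top ≤ csum - top
        · rw [if_pos hb2, if_pos hb2]
        · rw [if_neg hb2, if_neg hb2]
          set cs := csum - top with hcs
          set r := PySem.Int.mod top cs with hr
          have h0 : 0 < cs := by omega
          have hr0 : 0 ≤ r := PySem.Int.mod_nonneg _ h0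
          have hr1 : r < cs := PySem.Int.mod_lt _ h0
          refine ih _ _ _ _ (by omega) ?_ ?_
          · -- multiset invariant is preserved
            have hdecomp : arr.dropLast ++ [top] = arr := List.dropLast_append_getLast harr
            have e1 : (heap.erase (-top)).Perm ((arr.map (fun x => -x)).erase (-top)) :=
              hperm.erase _
            have e2 : (arr.map (fun x => -x)) = arr.dropLast.map (fun x => -x) ++ [-top] := by
              conv_lhs => rw [← hdecomp]
              simp
            have e3 : ((arr.map (fun x => -x)).erase (-top)).Perm
                (arr.dropLast.map (fun x => -x)) := by
              rw [e2]; exact erase_append_singleton_perm _ _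
            have e4 : (heap.erase (-top) ++ [0 - r]).Perm
                (arr.dropLast.map (fun x => -x) ++ [-r]) := by
              simp only [zero_sub]
              exact List.Perm.append (e1.trans e3) (List.Perm.refl [-r])
            have e5 : (arr.dropLast.map (fun x => -x) ++ [-r]).Perm
                ((r :: arr.dropLast).map (fun x => -x)) := by
              simp only [List.map_cons]
              exact List.perm_append_singleton (-r) (arr.dropLast.map (fun x => -x))
            have e6 : ((r :: arr.dropLast).map (fun x => -x)).Perm
                ((insertSorted r arr.dropLast).map (fun x => -x)) :=
              ((insertSorted_perm r arr.dropLast).map _).symm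
            exact (e4.trans e5).trans e6
          · exact insertSorted_pairwise _ _ (hsort.sublist (List.dropLast_sublist arr))
    · simp [hcnt]

-- ===== VERDICT (by name: the statement is the Claim_ definition above) =====
theorem isPossibleMakeTarget_spec : Claim_equal_isPossibleMakeTarget := by
  intro target _
  unfold Spec_isPossibleMakeTarget isPossibleMakeTarget isPossibleMakeTarget_alt
  have hperm0 : (PySem.List.sorted target (fun x => x) false).Perm target :=
    PySem.List.sorted_perm target (fun x => x) false
  have hsum : (PySem.List.sorted target (fun x => x) false).sum = target.sum :=
    hperm0.sum_eq
  rw [← hsum]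
  apply loops_agree ((PySem.List.sorted target (fun x => x) false).sum.toNat)
  · exact le_refl _
  · have : aBuildHeap target = target.map (fun o => -o) := by
      simp only [aBuildHeap, PySem.List.foldl_append_singleton_eq_map]
      induction target with
      | nil => rfl
      | cons x xs ihx => simp
    rw [this]
    exact (hperm0.map _).symm
  · simpa using (PySem.List.sorted_pairwise (xs := target) (key := fun x => x))
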